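-- pv_equiv track=rewrite | github.com/manicall/APL | lab10.py | __find_double_words
-- ===== SOURCE A (Python) =====
-- def __find_double_words(text):
--     result = []
--     line_count = 0
--
--     splited = ['']
--
--     # разделение слов без удаления переноса сроки
--     for i in range(len(text)):
--         if text[i] == ' ':
--             if splited[-1] != '':
--                 splited.append('')
--         elif text[i] == '\n':
--             splited.append('\n')
--             splited.append('')
--         elif text[i].isalnum():
--             splited[-1] += text[i]
--
--     for i in range(1, len(splited)):
--         # если данное слово оказалось равным предыдущему (с проверкой,
--         # что между словами может стоять перенос строки),
--         # то запоминаем слово, и строку в которой оно было найдено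
--         if splited[i - 1] == '\n' and splited[i] == splited[i - 2] or splited[i] == splited[i - 1]:
--             result.append((splited[i], line_count))
--         if splited[i] == '\n':
--             line_count += 1
--
--     return result
-- ===== SOURCE B (Python) =====
-- def __find_double_words(text):
--     # single streaming pass: no intermediate token list; finalize tokens on the fly
--     result = []
--     line = 0
--     p2 = None   # token two back
--     p1 = None   # previous token (None = current token is the first)
--     cur = ''
--
--     def finish(tok, p2, p1, line):
--         if p1 is not None:
--             if (p1 == '\n' and tok == p2) or tok == p1:
--                 result.append((tok, line))
--             if tok == '\n':
--                 line += 1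
--         return p1, tok, line
--
--     for ch in text:
--         if ch == ' ':
--             if cur != '':
--                 p2, p1, line = finish(cur, p2, p1, line)
--                 cur = ''
--         elif ch == '\n':
--             p2, p1, line = finish(cur, p2, p1, line)
--             p2, p1, line = finish('\n', p2, p1, line)
--             cur = ''
--         elif ch.isalnum():
--             cur += ch
--     finish(cur, p2, p1, line)
--     return result
-- ===== Notes on version B (the rewrite author's own statement) =====
-- stated objective: faster
-- what changed: A tokenizes the whole text into an intermediate token list and then rescans that list by index (looking up positions i-2, i-1, i); B makes a single streaming pass over the characters, finalizing each token on the fly and comparing it against a two-token sliding window, so no intermediate token list is built and the current word is grown in a local variable instead of being re-copied into the list on every character.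
import Mathlib
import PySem

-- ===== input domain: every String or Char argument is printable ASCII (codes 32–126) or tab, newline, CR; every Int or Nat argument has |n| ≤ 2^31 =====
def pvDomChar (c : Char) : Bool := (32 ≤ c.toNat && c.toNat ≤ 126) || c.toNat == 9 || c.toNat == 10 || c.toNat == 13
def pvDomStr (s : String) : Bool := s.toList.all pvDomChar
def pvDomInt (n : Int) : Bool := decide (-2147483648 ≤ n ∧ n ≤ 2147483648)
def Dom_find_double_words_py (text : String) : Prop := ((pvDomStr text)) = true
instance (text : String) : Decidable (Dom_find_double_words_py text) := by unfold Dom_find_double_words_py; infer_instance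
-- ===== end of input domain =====

-- B replaces A's two phases (build the full token list, then rescan it by index) by one
-- streaming pass that finalizes tokens on the fly against a two-token window; the timing
-- run measured B faster (it avoids re-copying the growing last token inside the list).

-- ===== PORT A =====
-- one step of A's first loop body (the branch on text[i])
def fdwTokStep (sp : List String) (c : Char) : List String :=
  if c = ' ' then (if sp.getLast! ≠ "" then sp ++ [""] else sp)
  else if c = '\n' then sp ++ ["\n", ""]
  else if PySem.Chars.isalnum c then sp.dropLast ++ [sp.getLast! ++ c.toString]
  else sp

-- one step of A's second loop body (state = (result, line_count), i the loop index)
def fdwScanStep (splited : List String) (st : List (String × Int) × Int) (i : Int) :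
    List (String × Int) × Int :=
  let si := PySem.List.pyGetD splited i ""
  let sim1 := PySem.List.pyGetD splited (i - 1) ""
  let sim2 := PySem.List.pyGetD splited (i - 2) ""
  let res := if (sim1 = "\n" ∧ si = sim2) ∨ si = sim1 then st.1 ++ [(si, st.2)] else st.1
  (res, if si = "\n" then st.2 + 1 else st.2)

def find_double_words_py (text : String) : List (String × Int) :=
  let splited :=
    (PySem.List.pyRange 0 (PySem.Str.len text) 1).foldl
      (fun sp i => fdwTokStep sp (PySem.List.pyGetD text.toList i ' ')) [""]
  ((PySem.List.pyRange 1 ((splited.length : Int)) 1).foldl (fdwScanStep splited) ([], 0)).1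

-- ===== PORT B =====
-- B's `finish`: check a finalized token against the previous two, shift the window
def fdwFinish (st : List (String × Int) × Option String × Option String × Int) (tok : String) :
    List (String × Int) × Option String × Option String × Int :=
  match st with
  | (res, p2, p1, line) =>
    match p1 with
    | none => (res, p1, some tok, line)
    | some w =>
      ((if (w = "\n" ∧ some tok = p2) ∨ tok = w then res ++ [(tok, line)] else res),
       p1, some tok, if tok = "\n" then line + 1 else line)

-- B's per-character step; state = ((result, p2, p1, line), cur)
def fdwStep (st : (List (String × Int) × Option String × Option String × Int) × String)
    (c : Char) : (List (String × Int) × Option String × Option String × Int) × String :=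
  let (s, cur) := st
  if c = ' ' then (if cur ≠ "" then (fdwFinish s cur, "") else st)
  else if c = '\n' then (fdwFinish (fdwFinish s cur) "\n", "")
  else if PySem.Chars.isalnum c then (s, cur ++ c.toString)
  else st

def find_double_words_py_alt (text : String) : List (String × Int) :=
  let fin := text.toList.foldl fdwStep (([], none, none, 0), "")
  (fdwFinish fin.1 fin.2).1

-- ===== PRECONDITION & SPEC =====
def Spec_find_double_words_py (text : String) (out : List (String × Int)) : Prop := out = find_double_words_py_alt text
instance (text : String) (out : List (String × Int)) : Decidable (Spec_find_double_words_py text out) := by unfold Spec_find_double_words_py; infer_instance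

-- ===== CLAIM (what is proved, stated in full; the proofs are below) =====
def Claim_equal_find_double_words_py : Prop := ∀ (text : String), Dom_find_double_words_py text → Spec_find_double_words_py text (find_double_words_py text)

-- ===== LEMMAS AND PROOFS =====

def fdwInit : List (String × Int) × Option String × Option String × Int := ([], none, none, 0)

lemma fdw_getLast!_concat (X : List String) (y : String) : (X ++ [y]).getLast! = y := by
  simp only [List.getLast!]
  split
  · rename_i h; exact absurd h (by simp)
  · rename_i a as h
    have h1 : (X ++ [y]).getLast? = some y := List.getLast?_concat
    rw [h] at h1
    have h2 := List.getLast?_eq_some_getLast (l := a :: as) (List.cons_ne_nil a as)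
    exact Option.some_injective _ (h2.symm.trans h1)

-- the tokenizer keeps the list nonempty and its first entry ≠ "\n"
lemma fdwTok_head (cs : List Char) :
    ∀ (sp : List String), (∃ h t, sp = h :: t ∧ h ≠ "\n") →
      ∃ h t, cs.foldl fdwTokStep sp = h :: t ∧ h ≠ "\n" := by
  induction cs with
  | nil => intro sp h; simpa using h
  | cons c cs ih =>
    intro sp h
    obtain ⟨hd, t, rfl, hne⟩ := h
    refine ih _ ?_
    unfold fdwTokStep
    split_ifs with h1 h2 h3
    · exact ⟨hd, t ++ [""], by simp, hne⟩
    · exact ⟨hd, t, rfl, hne⟩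
    · exact ⟨hd, t ++ ["\n", ""], by simp, hne⟩
    · cases t with
      | nil =>
        refine ⟨hd ++ c.toString, [], by simp, ?_⟩
        have hc : c ≠ '\n' := by
          rintro rfl
          exact absurd h3 (by decide)
        intro heq
        have hl := congrArg String.toList heq
        rw [String.toList_append] at hl
        have hcs : c.toString.toList = [c] := (String.ofList_eq.mp rfl).symm
        rw [hcs] at hl
        have hlen := congrArg List.length hl
        simp at hlen
        subst hlen
        simp at hl
        exact hc hl
      | cons a t' =>
        exact ⟨hd, (a :: t').dropLast ++ [(a :: t').getLast! ++ c.toString], by simp, hne⟩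
    · exact ⟨hd, t, rfl, hne⟩

lemma fdwStepAlign (X : List String) (y : String) (c : Char) :
    ∃ X' y', fdwTokStep (X ++ [y]) c = X' ++ [y'] ∧
      fdwStep (X.foldl fdwFinish fdwInit, y) c = (X'.foldl fdwFinish fdwInit, y') := by
  unfold fdwTokStep fdwStep
  rw [fdw_getLast!_concat, List.dropLast_concat]
  by_cases h1 : c = ' '
  · simp only [if_pos h1]
    by_cases h2 : y = ""
    · subst h2
      simp only [ne_eq, not_true_eq_false, if_false]
      exact ⟨X, "", by simp, by simp⟩
    · refine ⟨X ++ [y], "", by simp [h2], ?_⟩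
      simp [h2, List.foldl_append]
  · simp only [if_neg h1]
    by_cases h3 : c = '\n'
    · simp only [if_pos h3]
      refine ⟨X ++ [y, "\n"], "", by simp, ?_⟩
      simp [List.foldl_append]
    · simp only [if_neg h3]
      by_cases h4 : PySem.Chars.isalnum c
      · simp only [if_pos h4]
        exact ⟨X, y ++ c.toString, rfl, rfl⟩
      · simp only [if_neg h4]
        exact ⟨X, y, rfl, rfl⟩

-- fusing the two phases: B's char fold tracks (scan of finished tokens, current token)
lemma fdwFuse (cs : List Char) :
    ∀ (X : List String) (y : String),
      ∃ X' y', cs.foldl fdwTokStep (X ++ [y]) = X' ++ [y'] ∧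
        cs.foldl fdwStep (X.foldl fdwFinish fdwInit, y) = (X'.foldl fdwFinish fdwInit, y') := by
  induction cs with
  | nil => intro X y; exact ⟨X, y, rfl, rfl⟩
  | cons c cs ih =>
    intro X y
    obtain ⟨X1, y1, hT, hS⟩ := fdwStepAlign X y c
    obtain ⟨X', y', hT', hS'⟩ := ih X1 y1
    exact ⟨X', y', by rw [List.foldl_cons, hT, hT'], by rw [List.foldl_cons, hS, hS']⟩

-- A's index loop over splited = the structural fold of fdwFinish
lemma fdwScan_eq (sp : List String) :
    ∀ (n j : Nat) (res : List (String × Int)) (lc : Int) (p2 : Option String) (w : String),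
      sp.length - j = n → 1 ≤ j → sp[j-1]? = some w →
      (2 ≤ j → p2 = sp[j-2]?) → (j = 1 → w ≠ "\n") →
      (PySem.List.pyRange (j : Int) ((sp.length : Int)) 1).foldl (fdwScanStep sp) (res, lc)
        = (((sp.drop j).foldl fdwFinish (res, p2, some w, lc)).1,
           ((sp.drop j).foldl fdwFinish (res, p2, some w, lc)).2.2.2) := by
  intro n
  induction n with
  | zero =>
    intro j res lc p2 w hn h1 hw hp2 hj1
    have hj : sp.length ≤ j := by omega
    rw [PySem.List.pyRange_one_eq_nil (by exact_mod_cast hj)]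
    rw [List.drop_eq_nil_of_le hj]
    simp
  | succ n ih =>
    intro j res lc p2 w hn h1 hw hp2 hj1
    have hj : j < sp.length := by omega
    rw [PySem.List.pyRange_one_cons (by exact_mod_cast hj), List.foldl_cons]
    rw [List.drop_eq_getElem_cons hj, List.foldl_cons]
    have hsi : PySem.List.pyGetD sp (j : Int) "" = sp[j] := by
      rw [PySem.List.pyGetD_natCast]; exact List.getD_eq_getElem sp "" hj
    have e1 : ((j : Int) - 1) = ((j - 1 : Nat) : Int) := by omega
    have hsim1 : PySem.List.pyGetD sp ((j : Int) - 1) "" = w := by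
      rw [e1, PySem.List.pyGetD_natCast, List.getD_eq_getElem?_getD, hw]; rfl
    have hcond : ((w = "\n" ∧ sp[j] = PySem.List.pyGetD sp ((j : Int) - 2) "") ∨ sp[j] = w)
        ↔ ((w = "\n" ∧ some sp[j] = p2) ∨ sp[j] = w) := by
      by_cases hj2 : 2 ≤ j
      · have e2 : ((j : Int) - 2) = ((j - 2 : Nat) : Int) := by omega
        have hj2l : j - 2 < sp.length := by omega
        have hsim2 : PySem.List.pyGetD sp ((j : Int) - 2) "" = sp[j-2] := by
          rw [e2, PySem.List.pyGetD_natCast]; exact List.getD_eq_getElem sp "" hj2l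
        rw [hsim2, hp2 hj2, List.getElem?_eq_getElem hj2l]
        simp
      · have hw' := hj1 (by omega)
        constructor
        · rintro (⟨hweq, _⟩ | heq)
          · exact absurd hweq hw'
          · exact Or.inr heq
        · rintro (⟨hweq, _⟩ | heq)
          · exact absurd hweq hw'
          · exact Or.inr heq
    have hA : fdwScanStep sp (res, lc) (j : Int) =
        (if (w = "\n" ∧ some sp[j] = p2) ∨ sp[j] = w then res ++ [(sp[j], lc)] else res,
         if sp[j] = "\n" then lc + 1 else lc) := by
      simp only [fdwScanStep, hsi, hsim1]
      rw [if_congr hcond rfl rfl]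
    have hB : fdwFinish (res, p2, some w, lc) sp[j] =
        ((if (w = "\n" ∧ some sp[j] = p2) ∨ sp[j] = w then res ++ [(sp[j], lc)] else res),
         some w, some sp[j], if sp[j] = "\n" then lc + 1 else lc) := rfl
    rw [hA, hB]
    have ej : ((j : Int) + 1) = (((j + 1 : Nat)) : Int) := by omega
    rw [ej]
    exact ih (j + 1)
      (if (w = "\n" ∧ some sp[j] = p2) ∨ sp[j] = w then res ++ [(sp[j], lc)] else res)
      (if sp[j] = "\n" then lc + 1 else lc) (some w) sp[j]
      (by omega) (by omega)
      (by simp)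
      (fun _ => by simpa using hw.symm)
      (by omega)

lemma fdwScan_top (sp : List String) (h : String) (t : List String)
    (hsp : sp = h :: t) (hh : h ≠ "\n") :
    ((PySem.List.pyRange 1 ((sp.length : Int)) 1).foldl (fdwScanStep sp) ([], 0)).1
      = (sp.foldl fdwFinish fdwInit).1 := by
  subst hsp
  have h0 : (h :: t)[0]? = some h := rfl
  have := fdwScan_eq (h :: t) ((h :: t).length - 1) 1 [] 0 none h rfl (le_refl 1) h0
    (fun h2 => absurd h2 (by omega)) (fun _ => hh)
  rw [show ((1 : Nat) : Int) = (1 : Int) from rfl] at this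
  rw [this]
  simp only [List.drop_succ_cons, List.drop_zero, List.foldl_cons]
  rfl

-- ===== VERDICT (by name: the statement is the Claim_ definition above) =====
theorem find_double_words_py_spec : Claim_equal_find_double_words_py := by
  intro text _
  unfold Spec_find_double_words_py
  simp only [find_double_words_py, find_double_words_py_alt]
  have hlen : PySem.Str.len text = ((text.toList.length : Int)) := by
    simp [pysem]
  rw [hlen, PySem.List.foldl_pyRange_zero_pyGetD' text.toList ' ' fdwTokStep [""]]
  obtain ⟨hd, t, hsp, hh⟩ := fdwTok_head text.toList [""] ⟨"", [], rfl, by decide⟩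
  obtain ⟨X', y', hX, hB⟩ := fdwFuse text.toList [] ""
  simp only [List.nil_append] at hX
  simp only [List.foldl_nil] at hB
  rw [show fdwInit = (([], none, none, 0) : List (String × Int) × Option String × Option String × Int) from rfl] at hB
  rw [hB, hX]
  rw [hX] at hsp
  have hfin : fdwFinish (X'.foldl fdwFinish ([], none, none, 0)) y'
      = (X' ++ [y']).foldl fdwFinish fdwInit := by
    simp [List.foldl_append, fdwInit]
  rw [hfin]
  exact fdwScan_top (X' ++ [y']) hd t hsp hh
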